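-- pv_equiv track=rewrite | github.com/Entropicsky/CodeDoc | codedoc/enhancers/code_analyzer.py | _extract_patterns_from_text
-- ===== SOURCE A (Python) =====
-- from typing import Dict, List, Optional, Union, Any, Callable
--
-- def _extract_patterns_from_text(text: str) -> List[Dict[str, str]]:
--     """
--     Extract pattern information from LLM response text.
--     This is a simple implementation that looks for pattern names in headings.
--
--     Args:
--         text: LLM response text
--
--     Returns:
--         List of dictionaries with pattern information
--     """
--     patterns = []
--     current_pattern = None
--     current_description = []
--
--     # Simple parsing based on Markdown headings
--     for line in text.split('\n'):
--         # Check for heading that might indicate a pattern name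
--         if line.startswith('# ') or line.startswith('## ') or line.startswith('### '):
--             # If we were already collecting a pattern, save it
--             if current_pattern:
--                 patterns.append({
--                     "name": current_pattern,
--                     "description": '\n'.join(current_description).strip()
--                 })
--
--             # Start a new pattern
--             current_pattern = line.lstrip('#').strip()
--             current_description = []
--         elif current_pattern:
--             current_description.append(line)
--
--     # Add the last pattern if there is one
--     if current_pattern:
--         patterns.append({
--             "name": current_pattern,
--             "description": '\n'.join(current_description).strip()
--         })
--
--     return patterns
-- ===== SOURCE B (Python) =====
-- from typing import Dict, List
--
-- def _extract_patterns_from_text(text: str) -> List[Dict[str, str]]: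
--     """Single backward pass: walking the lines in reverse, the description lines
--     of each pattern are already in hand when its heading is reached, so no
--     running current_pattern/flush logic is needed."""
--     patterns = []
--     desc = []  # description lines seen so far, in reverse textual order
--     for line in reversed(text.split('\n')):
--         if line.startswith('# ') or line.startswith('## ') or line.startswith('### '):
--             name = line.lstrip('#').strip()
--             if name:
--                 patterns.append({
--                     "name": name,
--                     "description": '\n'.join(reversed(desc)).strip()
--                 })
--             desc = []
--         else:
--             desc.append(line)
--     patterns.reverse()
--     return patterns
-- ===== Notes on version B (the rewrite author's own statement) =====
-- stated objective: alternative
-- what changed: Replaces A's forward scan with a running current_pattern/current_description accumulator and end-of-loop flush by a single backward pass: iterating the lines in reverse, each heading's description lines are already collected when the heading is reached, so patterns are emitted on the spot (reversed at the end) and no flush or in-pattern state variable exists.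
import Mathlib
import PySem

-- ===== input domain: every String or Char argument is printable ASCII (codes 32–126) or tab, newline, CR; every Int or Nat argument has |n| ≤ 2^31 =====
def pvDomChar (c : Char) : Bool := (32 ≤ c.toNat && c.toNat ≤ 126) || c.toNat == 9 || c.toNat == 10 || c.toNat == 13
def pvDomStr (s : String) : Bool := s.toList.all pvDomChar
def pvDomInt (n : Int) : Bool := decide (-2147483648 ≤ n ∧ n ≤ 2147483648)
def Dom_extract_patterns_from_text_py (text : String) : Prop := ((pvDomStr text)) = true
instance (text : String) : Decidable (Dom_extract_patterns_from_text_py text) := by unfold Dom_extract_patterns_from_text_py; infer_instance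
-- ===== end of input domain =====

-- B replaces A's forward scan with accumulator-and-flush by a single backward pass that
-- emits each pattern at its heading (objective: alternative decomposition, same cost).

-- ===== PORT A =====
-- shared vocabulary of both ports (the same tests/constructions both Pythons perform)
def pvIsHeading (line : String) : Bool :=
  PySem.Str.startswith line "# " || PySem.Str.startswith line "## " || PySem.Str.startswith line "### "

-- line.lstrip('#').strip(): hand-ported dropWhile is exact for the one-char set '#'
def pvName (line : String) : String :=
  String.ofList (PySem.Chars.strip (line.toList.dropWhile (fun c => c == '#')))

def pvMkPat (name : String) (desc : List String) : List (String × String) :=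
  [("name", name), ("description", PySem.Str.strip (PySem.Str.join "\n" desc))]

-- A's loop; current_pattern = "" plays Python's falsy None/'' role
def pvLoopA : List String → List (List (String × String)) → String → List String →
    List (List (String × String))
  | [], ps, cur, desc => if cur ≠ "" then ps ++ [pvMkPat cur desc] else ps
  | line :: rest, ps, cur, desc =>
    if pvIsHeading line then
      pvLoopA rest (if cur ≠ "" then ps ++ [pvMkPat cur desc] else ps) (pvName line) []
    else if cur ≠ "" then
      pvLoopA rest ps cur (desc ++ [line])
    else
      pvLoopA rest ps cur desc

def extract_patterns_from_text_py (text : String) : List (List (String × String)) :=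
  pvLoopA (((PySem.Str.split? text "\n").getD [])) [] "" []

-- ===== PORT B =====
-- Source B's loop body: state = (desc lines in reverse textual order, patterns in reverse order)
def pvStepB (st : List String × List (List (String × String))) (line : String) :
    List String × List (List (String × String)) :=
  if pvIsHeading line then
    let name := pvName line
    ([], if name ≠ "" then st.2 ++ [pvMkPat name st.1.reverse] else st.2)
  else
    (st.1 ++ [line], st.2)

def extract_patterns_from_text_py_alt (text : String) : List (List (String × String)) :=
  (((((PySem.Str.split? text "\n").getD [])).reverse).foldl pvStepB ([], [])).2.reverse

-- ===== PRECONDITION & SPEC =====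
def Spec_extract_patterns_from_text_py (text : String) (out : List (List (String × String))) : Prop := out = extract_patterns_from_text_py_alt text
instance (text : String) (out : List (List (String × String))) : Decidable (Spec_extract_patterns_from_text_py text out) := by unfold Spec_extract_patterns_from_text_py; infer_instance

-- ===== CLAIM (what is proved, stated in full; the proofs are below) =====
def Claim_equal_extract_patterns_from_text_py : Prop := ∀ (text : String), Dom_extract_patterns_from_text_py text → Spec_extract_patterns_from_text_py text (extract_patterns_from_text_py text)

-- ===== LEMMAS AND PROOFS =====

-- proof-side specification of the backward pass, in textual order
def pvGo : List String → List String × List (List (String × String))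
  | [] => ([], [])
  | line :: rest =>
    let (d, ps) := pvGo rest
    if pvIsHeading line then
      ([], if pvName line ≠ "" then pvMkPat (pvName line) d :: ps else ps)
    else
      (line :: d, ps)

theorem pvFoldB_eq_go (ls : List String) :
    ls.reverse.foldl pvStepB ([], []) = ((pvGo ls).1.reverse, (pvGo ls).2.reverse) := by
  induction ls with
  | nil => rfl
  | cons l ls ih =>
    simp only [List.reverse_cons, List.foldl_append, List.foldl_cons, List.foldl_nil, ih]
    simp only [pvGo, pvStepB]
    cases hd : pvGo ls with
    | mk d ps =>
      by_cases h : pvIsHeading l = true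
      · simp [h]
        by_cases hn : pvName l = ""
        · simp [hn]
        · simp [hn]
      · simp [h]

theorem pvLoopA_eq_go (ls : List String) :
    ∀ (ps : List (List (String × String))) (cur : String) (desc : List String),
      pvLoopA ls ps cur desc =
        ps ++ (if cur ≠ "" then [pvMkPat cur (desc ++ (pvGo ls).1)] else []) ++ (pvGo ls).2 := by
  induction ls with
  | nil =>
    intro ps cur desc
    simp only [pvLoopA, pvGo]
    by_cases h : cur = "" <;> simp [h]
  | cons l ls ih =>
    intro ps cur desc
    simp only [pvLoopA, pvGo]
    cases hd : pvGo ls with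
    | mk d ps' =>
      by_cases h : pvIsHeading l = true
      · simp only [h, if_pos, ih, hd]
        by_cases hn : pvName l = "" <;> by_cases hc : cur = "" <;>
          simp [hn, hc, List.append_assoc]
      · simp only [h, Bool.false_eq_true, if_false]
        by_cases hc : cur = ""
        · simp [ih, hd, hc]
        · simp [ih, hd, hc, List.append_assoc]

-- ===== VERDICT (by name: the statement is the Claim_ definition above) =====
theorem extract_patterns_from_text_py_spec : Claim_equal_extract_patterns_from_text_py := by
  intro text _
  unfold Spec_extract_patterns_from_text_py extract_patterns_from_text_py extract_patterns_from_text_py_alt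
  rw [pvLoopA_eq_go, pvFoldB_eq_go]
  simp
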